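-- pv_equiv track=rewrite | github.com/junbeom-Son/baekjoon | 백준/Gold/2143. 두 배열의 합/두 배열의 합.py | initailizeCounts
-- ===== SOURCE A (Python) =====
-- def initailizeCounts(length, numbers):
--     counts = dict()
--     for i in range(length):
--         sum = 0
--         for j in range(i, length):
--             sum += numbers[j]
--             counts[sum] = counts.get(sum, 0) + 1
--
--     return counts
-- ===== SOURCE B (Python) =====
-- def initailizeCounts(length, numbers):
--     prefix = [0]
--     for x in numbers:
--         prefix.append(prefix[-1] + x)
--     counts = {}
--     for i in range(length):
--         for j in range(i + 1, length + 1):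
--             s = prefix[j] - prefix[i]
--             counts[s] = counts.get(s, 0) + 1
--     return counts
-- ===== Notes on version B (the rewrite author's own statement) =====
-- stated objective: alternative
-- what changed: B precomputes a prefix-sum table and counts each subarray sum as a difference P[j]-P[i] of table entries, instead of A's per-start running accumulator re-summed in the inner loop.
import Mathlib
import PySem

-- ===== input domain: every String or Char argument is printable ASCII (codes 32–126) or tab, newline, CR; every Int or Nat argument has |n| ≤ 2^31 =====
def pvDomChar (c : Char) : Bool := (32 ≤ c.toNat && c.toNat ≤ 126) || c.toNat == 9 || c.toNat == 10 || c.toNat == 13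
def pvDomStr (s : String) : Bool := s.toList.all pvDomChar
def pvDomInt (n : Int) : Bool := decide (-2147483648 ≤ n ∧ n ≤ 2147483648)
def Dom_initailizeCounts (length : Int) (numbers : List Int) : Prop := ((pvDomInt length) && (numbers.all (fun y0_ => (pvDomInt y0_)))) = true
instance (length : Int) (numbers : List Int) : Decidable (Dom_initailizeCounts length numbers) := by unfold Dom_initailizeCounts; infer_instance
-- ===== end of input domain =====

-- B replaces A's per-start running accumulator by a precomputed prefix-sum table,
-- counting each subarray sum as a difference of two table entries (objective: alternative).

-- ===== PORT A =====
def initailizeCounts (length : Int) (numbers : List Int) : List (Int × Int) :=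
  ((PySem.List.pyRange 0 length 1).foldl
    (fun (counts : PySem.Dict Int Int) i =>
      ((PySem.List.pyRange i length 1).foldl
        (fun (st : Int × PySem.Dict Int Int) j =>
          let s := st.1 + PySem.List.pyGetD numbers j 0
          (s, PySem.Dict.modify st.2 s 0 (· + 1)))
        ((0 : Int), counts)).2)
    PySem.Dict.empty).items

-- ===== PORT B =====
-- prefix = [0]; for x in numbers: prefix.append(prefix[-1] + x)
def pvPrefix (numbers : List Int) : List Int :=
  numbers.foldl (fun p x => p ++ [PySem.List.pyGetD p (-1) 0 + x]) [0]

def initailizeCounts_alt (length : Int) (numbers : List Int) : List (Int × Int) :=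
  let P := pvPrefix numbers
  ((PySem.List.pyRange 0 length 1).foldl
    (fun (counts : PySem.Dict Int Int) i =>
      (PySem.List.pyRange (i + 1) (length + 1) 1).foldl
        (fun counts j =>
          PySem.Dict.modify counts (PySem.List.pyGetD P j 0 - PySem.List.pyGetD P i 0) 0 (· + 1))
        counts)
    PySem.Dict.empty).items

-- ===== PRECONDITION & SPEC =====
-- A (and B) raise IndexError exactly when length exceeds the list's length.
def Pre_initailizeCounts (length : Int) (numbers : List Int) : Prop :=
  length ≤ (numbers.length : Int)
instance (length : Int) (numbers : List Int) : Decidable (Pre_initailizeCounts length numbers) := by unfold Pre_initailizeCounts; infer_instance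

def pvWitness_initailizeCounts : Int × List Int := (3, [1, -1, 2])

def Spec_initailizeCounts (length : Int) (numbers : List Int) (out : List (Int × Int)) : Prop := out = initailizeCounts_alt length numbers
instance (length : Int) (numbers : List Int) (out : List (Int × Int)) : Decidable (Spec_initailizeCounts length numbers out) := by unfold Spec_initailizeCounts; infer_instance

-- ===== CLAIM (what is proved, stated in full; the proofs are below) =====
def Claim_equal_initailizeCounts : Prop := ∀ (length : Int) (numbers : List Int), Dom_initailizeCounts length numbers → Pre_initailizeCounts length numbers → Spec_initailizeCounts length numbers (initailizeCounts length numbers)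

-- ===== LEMMAS AND PROOFS =====

-- the prefix fold is scanl
lemma pvPrefix_aux (xs : List Int) : ∀ (p : List Int) (hp : p ≠ []),
    xs.foldl (fun p x => p ++ [PySem.List.pyGetD p (-1) 0 + x]) p
      = p.dropLast ++ List.scanl (· + ·) (p.getLast hp) xs := by
  induction xs with
  | nil => intro p hp; simp [List.scanl_nil, List.dropLast_append_getLast hp]
  | cons x xs ih =>
      intro p hp
      rw [List.foldl_cons, PySem.List.pyGetD_neg_one p 0 hp,
          ih (p ++ [p.getLast hp + x]) (by simp), List.scanl_cons]
      rw [List.dropLast_concat, List.getLast_concat]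
      rw [← List.singleton_append, ← List.append_assoc, List.dropLast_append_getLast hp]

lemma scanl_getD (xs : List Int) : ∀ (a : Int) (k : Nat), k ≤ xs.length →
    (List.scanl (· + ·) a xs).getD k 0 = a + (xs.take k).sum := by
  induction xs with
  | nil =>
      intro a k hk
      have : k = 0 := by simpa using hk
      subst this; simp [List.scanl_nil]
  | cons x xs ih =>
      intro a k hk
      cases k with
      | zero => simp [List.scanl_cons]
      | succ k =>
          rw [List.scanl_cons, List.getD_cons_succ, ih (a + x) k (by simpa using hk)]
          simp; ring

lemma pvPrefix_getD (numbers : List Int) (k : Nat) (hk : k ≤ numbers.length) :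
    (pvPrefix numbers).getD k 0 = (numbers.take k).sum := by
  unfold pvPrefix
  rw [pvPrefix_aux numbers [0] (by simp)]
  simpa using scanl_getD numbers 0 k hk

lemma pvPrefix_pyGetD (numbers : List Int) (j : Int) (h0 : 0 ≤ j) (hj : j ≤ (numbers.length : Int)) :
    PySem.List.pyGetD (pvPrefix numbers) j 0 = (numbers.take j.toNat).sum := by
  obtain ⟨k, rfl⟩ : ∃ k : Nat, j = (k : Int) := ⟨j.toNat, by omega⟩
  rw [PySem.List.pyGetD_natCast, pvPrefix_getD numbers k (by exact_mod_cast hj)]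
  simp

-- inner loop: A's running sum vs the prefix-difference keys
lemma inner_loop (numbers : List Int) (length i : Int)
    (hlen : length ≤ (numbers.length : Int)) (hi : 0 ≤ i) :
    ∀ (n : Nat) (a S : Int) (c : PySem.Dict Int Int), i ≤ a → (length - a).toNat = n →
    S = (numbers.take a.toNat).sum - (numbers.take i.toNat).sum →
    ((PySem.List.pyRange a length 1).foldl
        (fun (st : Int × PySem.Dict Int Int) j =>
          let s := st.1 + PySem.List.pyGetD numbers j 0
          (s, PySem.Dict.modify st.2 s 0 (· + 1)))
        (S, c)).2
      = (PySem.List.pyRange (a + 1) (length + 1) 1).foldl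
          (fun c j =>
            PySem.Dict.modify c ((numbers.take j.toNat).sum - (numbers.take i.toNat).sum) 0 (· + 1))
          c := by
  intro n
  induction n with
  | zero =>
      intro a S c ha hn _
      rw [PySem.List.pyRange_one_eq_nil (by omega), PySem.List.pyRange_one_eq_nil (by omega)]
      simp
  | succ n ih =>
      intro a S c ha hn hS
      have h2 : a + 1 < length + 1 := by omega
      rw [PySem.List.pyRange_one_cons (show a < length by omega),
          PySem.List.pyRange_one_cons (a := a + 1) (b := length + 1) h2]
      simp only [List.foldl_cons]
      have hS' : S + PySem.List.pyGetD numbers a 0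
          = (numbers.take (a + 1).toNat).sum - (numbers.take i.toNat).sum := by
        have h0a : 0 ≤ a := le_trans hi ha
        have haN : a.toNat < numbers.length := by omega
        rw [PySem.List.pyGetD_eq_getElem numbers 0 h0a (by omega), hS]
        have ht : (a + 1).toNat = a.toNat + 1 := by omega
        rw [ht, List.take_add_one, List.sum_append, List.getElem?_eq_getElem haN]
        simp; ring
      rw [hS']
      exact ih (a + 1) _ _ (by omega) (by omega) rfl

-- ===== VERDICT (by name: the statement is the Claim_ definition above) =====
theorem initailizeCounts_spec : Claim_equal_initailizeCounts := by
  intro length numbers _ hpre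
  have hlen : length ≤ (numbers.length : Int) := hpre
  unfold Spec_initailizeCounts initailizeCounts initailizeCounts_alt
  refine congrArg PySem.Dict.items ?_
  refine PySem.List.foldl_congr_mem _ _ _ _ ?_
  intro c i hi
  obtain ⟨h0i, hil⟩ := (PySem.List.mem_pyRange_one).1 hi
  rw [inner_loop numbers length i hlen h0i (length - i).toNat i 0 c le_rfl rfl (by ring)]
  refine PySem.List.foldl_congr_mem _ _ _ _ ?_
  intro c' j hj
  obtain ⟨h1j, h2j⟩ := (PySem.List.mem_pyRange_one).1 hj
  rw [pvPrefix_pyGetD numbers j (by omega) (by omega),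
      pvPrefix_pyGetD numbers i (by omega) (by omega)]
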